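-- pv_equiv track=rewrite | github.com/EdmondRen/mathusla-newsim | python/simhelper/parser.py | unpack_at
-- ===== SOURCE A (Python) =====
-- def unpack_at(concatlist, divider=-1):
--     lists = []
--     n = 0
--     for val in concatlist:
--         if val == -1:
--             n += 1
--         else:
--             while len(lists) <= n:
--                 lists.append([])
--             lists[n].append(val)
--     return lists
-- ===== SOURCE B (Python) =====
-- def unpack_at(concatlist, divider=-1):
--     # Drop the trailing run of -1 separators, then split what remains at each -1.
--     end = len(concatlist)
--     while end > 0 and concatlist[end - 1] == -1:
--         end -= 1
--     if end == 0:
--         return []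
--     segments = []
--     seg = []
--     for v in concatlist[:end]:
--         if v == -1:
--             segments.append(seg)
--             seg = []
--         else:
--             seg.append(v)
--     segments.append(seg)
--     return segments
-- ===== Notes on version B (the rewrite author's own statement) =====
-- stated objective: alternative
-- what changed: Replaces A's loop that fills a list-of-lists at a running divider-count index n (padding with empty lists on demand) by: first strip the trailing run of -1 separators, then split the remaining prefix at each -1 with a plain segment accumulator.
import Mathlib
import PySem

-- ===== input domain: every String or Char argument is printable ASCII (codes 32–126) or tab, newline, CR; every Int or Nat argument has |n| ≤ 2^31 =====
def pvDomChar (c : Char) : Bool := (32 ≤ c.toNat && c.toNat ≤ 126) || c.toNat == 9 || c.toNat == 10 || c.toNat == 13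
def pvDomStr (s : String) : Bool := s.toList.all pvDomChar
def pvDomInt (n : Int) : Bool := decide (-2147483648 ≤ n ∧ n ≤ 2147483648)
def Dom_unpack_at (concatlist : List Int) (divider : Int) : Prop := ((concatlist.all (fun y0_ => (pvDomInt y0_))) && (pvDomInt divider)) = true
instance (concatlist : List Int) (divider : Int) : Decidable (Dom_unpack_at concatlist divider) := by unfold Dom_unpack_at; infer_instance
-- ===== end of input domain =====

-- B replaces A's fill-at-running-index-n loop (with its padding inner loop) by:
-- strip the trailing run of -1 separators, then split the rest at each -1 with a
-- plain accumulator (alternative decomposition, same cost).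
-- Like A, both ports compare against the literal -1 and ignore `divider`.

-- ===== PORT A =====
-- the `while len(lists) <= n: lists.append([])` loop
def padTo (lists : List (List Int)) (n : Nat) : List (List Int) :=
  if _h : lists.length ≤ n then padTo (lists ++ [[]]) n else lists
termination_by n + 1 - lists.length
decreasing_by simp; omega

-- one iteration of A's `for val in concatlist` loop, state = (lists, n)
def stepA (st : List (List Int) × Nat) (val : Int) : List (List Int) × Nat :=
  if val = -1 then (st.1, st.2 + 1)
  else
    let l := padTo st.1 st.2
    (l.set st.2 (l.getD st.2 [] ++ [val]), st.2)

def unpack_at (concatlist : List Int) (divider : Int) : List (List Int) :=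
  (concatlist.foldl stepA ([], 0)).1

-- ===== PORT B =====
-- Source B's `while end > 0 and concatlist[end - 1] == -1: end -= 1` loop.
-- The index end-1 is always in range (end ≤ length), so List.getD is exact here.
def trimEnd (concatlist : List Int) (e : Nat) : Nat :=
  if _h : 0 < e ∧ concatlist.getD (e - 1) 0 = -1 then trimEnd concatlist (e - 1) else e
termination_by e
decreasing_by omega

-- one iteration of Source B's `for v in concatlist[:end]` loop, state = (segments, seg)
def stepB (st : List (List Int) × List Int) (v : Int) : List (List Int) × List Int :=
  if v = -1 then (st.1 ++ [st.2], []) else (st.1, st.2 ++ [v])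

def unpack_at_alt (concatlist : List Int) (divider : Int) : List (List Int) :=
  let e := trimEnd concatlist concatlist.length
  if e = 0 then []
  else
    let st := (concatlist.take e).foldl stepB ([], [])
    st.1 ++ [st.2]

-- ===== PRECONDITION & SPEC =====
def Spec_unpack_at (concatlist : List Int) (divider : Int) (out : List (List Int)) : Prop := out = unpack_at_alt concatlist divider
instance (concatlist : List Int) (divider : Int) (out : List (List Int)) : Decidable (Spec_unpack_at concatlist divider out) := by unfold Spec_unpack_at; infer_instance

-- ===== CLAIM (what is proved, stated in full; the proofs are below) =====
def Claim_equal_unpack_at : Prop := ∀ (concatlist : List Int) (divider : Int), Dom_unpack_at concatlist divider → Spec_unpack_at concatlist divider (unpack_at concatlist divider)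

-- ===== LEMMAS AND PROOFS =====

-- canonical right-fold description of the result, used as the bridge between the two ports
def stepGo (v : Int) (acc : List (List Int)) : List (List Int) :=
  if v = -1 then (if acc = [] then [] else [] :: acc)
  else match acc with
    | [] => [[v]]
    | s :: t => (v :: s) :: t

lemma padTo_eq_aux : ∀ (k : Nat) (lists : List (List Int)) (n : Nat),
    n + 1 - lists.length = k → padTo lists n = lists ++ List.replicate k [] := by
  intro k
  induction k with
  | zero =>
    intro lists n h
    rw [padTo]
    simp only [List.replicate_zero, List.append_nil]
    have : ¬ lists.length ≤ n := by omega
    simp [this]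
  | succ k ih =>
    intro lists n h
    have hle : lists.length ≤ n := by omega
    rw [padTo]
    simp only [hle, dite_true]
    rw [ih (lists ++ [[]]) n (by simp; omega)]
    simp [List.replicate_succ]

lemma padTo_eq (lists : List (List Int)) (n : Nat) :
    padTo lists n = lists ++ List.replicate (n + 1 - lists.length) [] :=
  padTo_eq_aux _ lists n rfl

lemma pad_length (lists : List (List Int)) (n : Nat) (h : lists.length ≤ n + 1) :
    (lists ++ List.replicate (n + 1 - lists.length) []).length = n + 1 := by
  simp; omega

lemma pad_getD (lists : List (List Int)) (n : Nat) :
    (lists ++ List.replicate (n + 1 - lists.length) []).getD n [] = lists.getD n [] := by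
  by_cases h : n < lists.length
  · simp [List.getD, List.getElem?_append_left h]
  · simp only [List.getD]
    rw [List.getElem?_append_right (by omega)]
    rcases Nat.lt_or_ge n (n + 1) with _ | _
    · by_cases h2 : n - lists.length < n + 1 - lists.length
      · simp [h2, List.getElem?_eq_none (by omega : lists.length ≤ n)]
      · simp [h2, List.getElem?_eq_none (by omega : lists.length ≤ n)]
    · omega

lemma pad_set_getD (lists : List (List Int)) (n : Nat) (h : lists.length ≤ n + 1) :
    (lists ++ List.replicate (n + 1 - lists.length) []).set n (lists.getD n []) =
      lists ++ List.replicate (n + 1 - lists.length) [] := by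
  have hlen : n < (lists ++ List.replicate (n + 1 - lists.length) []).length := by simp; omega
  have hg : (lists ++ List.replicate (n + 1 - lists.length) [])[n] = lists.getD n [] := by
    have := pad_getD lists n
    simp only [List.getD, List.getElem?_eq_getElem hlen] at this
    simpa using this
  rw [← hg, List.set_getElem_self]

-- A's loop from a general state, characterised by stepGo
lemma runA_eq : ∀ (xs : List Int) (lists : List (List Int)) (n : Nat), lists.length ≤ n + 1 →
    (xs.foldl stepA (lists, n)).1 =
      match xs.foldr stepGo [] with
      | [] => lists
      | s :: t =>
          (lists ++ List.replicate (n + 1 - lists.length) []).set n (lists.getD n [] ++ s) ++ t := by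
  intro xs
  induction xs with
  | nil => intro lists n h; simp
  | cons v rest ih =>
    intro lists n h
    simp only [List.foldl_cons, List.foldr_cons]
    by_cases hv : v = -1
    · -- divider: n increments
      have hA : stepA (lists, n) v = (lists, n + 1) := by simp [stepA, hv]
      rw [hA, ih lists (n + 1) (by omega)]
      rcases hR : rest.foldr stepGo [] with _ | ⟨s, t⟩
      · simp [stepGo, hv]
      · simp only [stepGo, hv, if_true]
        simp only [if_neg, reduceCtorEq, not_false_eq_true]
        have hgd : lists.getD (n + 1) [] = [] := by
          simp [List.getD, List.getElem?_eq_none (by omega : lists.length ≤ n + 1)]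
        have hrep : (n + 2) - lists.length = ((n + 1) - lists.length) + 1 := by omega
        rw [hgd, hrep, List.replicate_succ', ← List.append_assoc]
        rw [List.set_append_right _ _ (by simp; omega)]
        have hlen : (lists ++ List.replicate (n + 1 - lists.length) []).length = n + 1 :=
          pad_length lists n h
        rw [hlen]
        simp only [Nat.sub_self, List.set_cons_zero, List.nil_append]
        rw [List.append_assoc]
        simp only [List.singleton_append, List.append_nil]
        rw [pad_set_getD lists n h]
    · -- value: pad and append at index n
      have hA : stepA (lists, n) v =
          ((lists ++ List.replicate (n + 1 - lists.length) []).set n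
            (lists.getD n [] ++ [v]), n) := by
        simp only [stepA, hv, if_false]
        rw [padTo_eq, pad_getD]
      rw [hA]
      set P := lists ++ List.replicate (n + 1 - lists.length) [] with hP
      set L2 := P.set n (lists.getD n [] ++ [v]) with hL2
      have hlenP : P.length = n + 1 := pad_length lists n h
      have hlen2 : L2.length = n + 1 := by simp [hL2, hlenP]
      rw [ih L2 n (by omega)]
      have hg2 : L2.getD n [] = lists.getD n [] ++ [v] := by
        simp [hL2, List.getD, hlenP]
      rcases hR : rest.foldr stepGo [] with _ | ⟨s, t⟩
      · simp only [stepGo, hv, if_false]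
        rw [hL2]
        simp [List.getD]
      · simp only [stepGo, hv, if_false]
        have hpad2 : (n + 1) - L2.length = 0 := by omega
        rw [hpad2]
        simp only [List.replicate_zero, List.append_nil, hg2]
        rw [hL2, List.set_set]
        simp

-- proof-side abbreviation: Source B's split loop run from the empty state
def splitF (xs : List Int) : List (List Int) :=
  let st := xs.foldl stepB ([], [])
  st.1 ++ [st.2]

lemma splitF_ne_nil (xs : List Int) : splitF xs ≠ [] := by
  simp [splitF]

lemma splitF_state : ∀ (xs : List Int) (segs : List (List Int)) (cur : List Int),
    (xs.foldl stepB (segs, cur)).1 ++ [(xs.foldl stepB (segs, cur)).2] =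
      segs ++ (match splitF xs with
               | [] => []
               | s :: t => (cur ++ s) :: t) := by
  intro xs
  induction xs with
  | nil => intro segs cur; simp [splitF]
  | cons v rest ih =>
    intro segs cur
    rcases hR : splitF rest with _ | ⟨s, t⟩
    · exact absurd hR (splitF_ne_nil rest)
    by_cases hv : v = -1
    · subst hv
      have h1 : (((-1 : Int) :: rest).foldl stepB (segs, cur)) =
          rest.foldl stepB (segs ++ [cur], []) := by simp [stepB]
      have h2 : splitF ((-1 : Int) :: rest) = [] :: s :: t := by
        have h3 : splitF ((-1 : Int) :: rest) =
            (rest.foldl stepB ([[]], [])).1 ++ [(rest.foldl stepB ([[]], [])).2] := by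
          simp [splitF, stepB]
        rw [h3, ih [[]] [], hR]
        simp
      rw [h1, ih (segs ++ [cur]) [], hR, h2]
      simp
    · have h1 : ((v :: rest).foldl stepB (segs, cur)) =
          rest.foldl stepB (segs, cur ++ [v]) := by simp [stepB, hv]
      have h2 : splitF (v :: rest) = ([v] ++ s) :: t := by
        have h3 : splitF (v :: rest) =
            (rest.foldl stepB ([], [v])).1 ++ [(rest.foldl stepB ([], [v])).2] := by
          simp [splitF, stepB, hv]
        rw [h3, ih [] [v], hR]
        simp
      rw [h1, ih segs (cur ++ [v]), hR, h2]
      simp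

lemma splitF_cons_div (ys : List Int) : splitF ((-1) :: ys) = [] :: splitF ys := by
  rcases hR : splitF ys with _ | ⟨s, t⟩
  · exact absurd hR (splitF_ne_nil ys)
  · have h3 : splitF ((-1 : Int) :: ys) =
        (ys.foldl stepB ([[]], [])).1 ++ [(ys.foldl stepB ([[]], [])).2] := by
      simp [splitF, stepB]
    rw [h3, splitF_state ys [[]] [], hR]
    simp

lemma splitF_cons_val (v : Int) (hv : v ≠ -1) (ys : List Int) :
    splitF (v :: ys) =
      match splitF ys with
      | [] => [[v]]
      | s :: t => (v :: s) :: t := by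
  rcases hR : splitF ys with _ | ⟨s, t⟩
  · exact absurd hR (splitF_ne_nil ys)
  · have h3 : splitF (v :: ys) =
        (ys.foldl stepB ([], [v])).1 ++ [(ys.foldl stepB ([], [v])).2] := by
      simp [splitF, stepB, hv]
    rw [h3, splitF_state ys [] [v], hR]
    simp

-- the while loop, cons-step characterisation
lemma trimEnd_cons_aux (v : Int) : ∀ (xs : List Int) (e : Nat), e ≤ xs.length →
    trimEnd (v :: xs) (e + 1) =
      if trimEnd xs e = 0 then (if v = -1 then 0 else 1) else trimEnd xs e + 1 := by
  intro xs e
  induction e with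
  | zero =>
    intro _
    have h0 : trimEnd xs 0 = 0 := by rw [trimEnd]; simp
    have h1 : trimEnd (v :: xs) 0 = 0 := by rw [trimEnd]; simp
    rw [h0, if_pos rfl, trimEnd]
    by_cases hv : v = -1
    · rw [dif_pos ⟨Nat.one_pos, by simpa using hv⟩, h1, if_pos hv]
    · rw [dif_neg (fun h => hv (by simpa using h.2)), if_neg hv]
  | succ e ih =>
    intro hle
    have hgd : (v :: xs).getD (e + 1) 0 = xs.getD e 0 := List.getD_cons_succ
    by_cases hc : xs.getD e 0 = -1
    · have h1 : trimEnd xs (e + 1) = trimEnd xs e := by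
        rw [trimEnd, dif_pos ⟨Nat.succ_pos e, hc⟩]
        simp
      have h2 : trimEnd (v :: xs) (e + 1 + 1) = trimEnd (v :: xs) (e + 1) := by
        rw [trimEnd, dif_pos ⟨Nat.succ_pos (e + 1), hgd.symm ▸ hc⟩]
        simp
      rw [h2, ih (by omega), h1]
    · have h1 : trimEnd xs (e + 1) = e + 1 := by
        rw [trimEnd, dif_neg (fun h => hc h.2)]
      have h2 : trimEnd (v :: xs) (e + 1 + 1) = e + 1 + 1 := by
        rw [trimEnd, dif_neg (fun h => hc (hgd.symm.trans h.2))]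
      rw [h1, h2]
      simp

lemma trimEnd_le : ∀ (xs : List Int) (e : Nat), trimEnd xs e ≤ e := by
  intro xs e
  induction e with
  | zero => rw [trimEnd]; simp
  | succ e ih =>
    rw [trimEnd]
    split
    · simpa using Nat.le_trans ih (by omega)
    · omega

-- B, characterised by stepGo
lemma runB_eq : ∀ (xs : List Int),
    (if trimEnd xs xs.length = 0 then []
     else splitF (xs.take (trimEnd xs xs.length))) = xs.foldr stepGo [] := by
  intro xs
  induction xs with
  | nil => rw [trimEnd]; simp
  | cons v rest ih =>
    have hlen : (v :: rest).length = rest.length + 1 := rfl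
    rw [hlen, trimEnd_cons_aux v rest rest.length (le_refl _)]
    set e0 := trimEnd rest rest.length with he0
    by_cases h0 : e0 = 0
    · -- tail contributes nothing
      have htail : rest.foldr stepGo [] = [] := by rw [← ih]; simp [h0]
      simp only [h0, if_true, List.foldr_cons, htail]
      by_cases hv : v = -1
      · simp [stepGo, hv]
      · simp only [stepGo, hv, if_false]
        have : (1 : Nat) ≠ 0 := by omega
        simp only [this, if_false]
        rw [List.take_succ_cons, List.take_zero]
        have := splitF_cons_val v hv []
        simp [splitF] at this ⊢
        simp [stepB, hv]
    · -- tail contributes s :: t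
      have htail : rest.foldr stepGo [] = splitF (rest.take e0) := by
        rw [← ih]; simp [h0]
      have hle : e0 ≤ rest.length := trimEnd_le rest rest.length
      by_cases hv : v = -1
      · simp only [h0, if_false, hv, List.foldr_cons, htail]
        rw [List.take_succ_cons, splitF_cons_div]
        have hne := splitF_ne_nil (rest.take e0)
        rcases hS : splitF (rest.take e0) with _ | ⟨s, t⟩
        · exact absurd hS hne
        · simp [stepGo]
      · simp only [h0, if_false, List.foldr_cons, htail]
        rw [List.take_succ_cons, splitF_cons_val v hv]
        have hne := splitF_ne_nil (rest.take e0)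
        rcases hS : splitF (rest.take e0) with _ | ⟨s, t⟩
        · exact absurd hS hne
        · simp [stepGo, hv]

-- ===== VERDICT (by name: the statement is the Claim_ definition above) =====
theorem unpack_at_spec : Claim_equal_unpack_at := by
  intro concatlist divider _
  show unpack_at concatlist divider = unpack_at_alt concatlist divider
  unfold unpack_at unpack_at_alt
  rw [runA_eq concatlist [] 0 (by simp)]
  rw [← runB_eq concatlist]
  rcases h : trimEnd concatlist concatlist.length with _ | e
  · simp
  · have : ¬ (e + 1 = 0) := by omega
    simp only [this, if_false, splitF]
    rcases hS : ((concatlist.take (e+1)).foldl stepB ([], [])).1 ++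
        [((concatlist.take (e+1)).foldl stepB ([], [])).2] with _ | ⟨s, t⟩
    · simp at hS
    · simp
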